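-- pv_equiv track=rewrite | github.com/corgi-m/blockchain_visiable | visiable/visget.py | balanceformat
-- ===== SOURCE A (Python) =====
-- def balanceformat(balance) -> str:
--     res = ""
--     form = "{{{0}: {1}}}"
--     for i, balan in enumerate(balance.items()):
--         res += form.format(balan[0], balan[1])
--         if (i + 1) % 5 == 0:
--             res += "<br>"
--     return res
-- ===== SOURCE B (Python) =====
-- def balanceformat(balance) -> str:
--     items = list(balance.items())
--     pieces = []
--     for start in range(0, len(items), 5):
--         chunk = items[start:start + 5]
--         piece = "".join("{{{0}: {1}}}".format(k, v) for k, v in chunk)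
--         if len(chunk) == 5:
--             piece += "<br>"
--         pieces.append(piece)
--     return "".join(pieces)
-- ===== Notes on version B (the rewrite author's own statement) =====
-- stated objective: alternative
-- what changed: Replaces the single enumerate loop with an index-modulo test by slicing the items into chunks of 5, joining each chunk's formatted entries and appending '<br>' only after full chunks, then joining the chunk pieces.
import Mathlib
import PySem

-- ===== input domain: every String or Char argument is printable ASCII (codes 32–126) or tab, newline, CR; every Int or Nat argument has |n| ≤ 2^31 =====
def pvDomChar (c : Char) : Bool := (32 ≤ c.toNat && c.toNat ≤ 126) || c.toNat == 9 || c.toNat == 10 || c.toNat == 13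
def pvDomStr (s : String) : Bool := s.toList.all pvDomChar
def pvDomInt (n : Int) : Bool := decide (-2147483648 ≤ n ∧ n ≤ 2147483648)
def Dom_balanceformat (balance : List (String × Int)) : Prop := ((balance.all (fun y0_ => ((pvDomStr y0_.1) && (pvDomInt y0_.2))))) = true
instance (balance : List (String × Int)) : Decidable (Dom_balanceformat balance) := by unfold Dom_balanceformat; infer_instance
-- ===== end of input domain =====

-- B reformulates A's enumerate loop (index-modulo test) as slicing into chunks of 5 and joining
-- per-chunk pieces; equal cost, different decomposition ("alternative").

-- ===== PORT A =====
-- loop body of A: res += form.format(k, v); if (i+1) % 5 == 0: res += "<br>"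
def aStep (res : String) (p : Int × (String × Int)) : String :=
  let r := res ++ "{" ++ p.2.1 ++ ": " ++ PySem.Int.toStr p.2.2 ++ "}"
  if PySem.Int.mod (p.1 + 1) 5 == 0 then r ++ "<br>" else r

def balanceformat (balance : List (String × Int)) : String :=
  (PySem.List.enumerate balance).foldl aStep ""

-- ===== PORT B =====
def fmtEntry (p : String × Int) : String :=
  "{" ++ p.1 ++ ": " ++ PySem.Int.toStr p.2 ++ "}"

-- one piece per chunk items[start:start+5] of Source B's range loop
def chunkPieces (items : List (String × Int)) : List String :=
  if h : items = [] then []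
  else
    (PySem.Str.join "" ((items.take 5).map fmtEntry) ++
      (if (items.take 5).length = 5 then "<br>" else "")) :: chunkPieces (items.drop 5)
termination_by items.length
decreasing_by
  have := List.length_pos_of_ne_nil h
  simp [List.length_drop]; omega

def balanceformat_alt (balance : List (String × Int)) : String :=
  PySem.Str.join "" (chunkPieces balance)

-- ===== PRECONDITION & SPEC =====
def Spec_balanceformat (balance : List (String × Int)) (out : String) : Prop := out = balanceformat_alt balance
instance (balance : List (String × Int)) (out : String) : Decidable (Spec_balanceformat balance out) := by unfold Spec_balanceformat; infer_instance

-- ===== CLAIM (what is proved, stated in full; the proofs are below) =====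
def Claim_equal_balanceformat : Prop := ∀ (balance : List (String × Int)), Dom_balanceformat balance → Spec_balanceformat balance (balanceformat balance)

-- ===== LEMMAS AND PROOFS =====
theorem join_empty_nil : PySem.Str.join "" ([] : List String) = "" := by
  simp [PySem.Str.join, PySem.Chars.join_nil]

theorem join_empty_cons (x : String) (l : List String) :
    PySem.Str.join "" (x :: l) = x ++ PySem.Str.join "" l := by
  cases l with
  | nil =>
    simp [PySem.Str.join, PySem.Chars.join_singleton, PySem.Chars.join_nil,
      String.ofList_toList]
  | cons y l' =>
    simp [PySem.Str.join, PySem.Chars.join_cons_cons, String.ofList_append,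
      String.ofList_toList]

theorem aStep_acc (acc : String) (p : Int × (String × Int)) :
    aStep acc p = acc ++ aStep "" p := by
  simp only [aStep]
  split <;> simp [String.append_assoc, String.empty_append]

theorem foldl_aStep_acc (xs : List (Int × (String × Int))) (acc : String) :
    xs.foldl aStep acc = acc ++ xs.foldl aStep "" := by
  induction xs generalizing acc with
  | nil => simp
  | cons p xs ih =>
    simp only [List.foldl_cons]
    rw [ih (aStep acc p), ih (aStep "" p), aStep_acc acc p, String.append_assoc]

theorem brace_merge (x : String) : "}" ++ ("{" ++ x) = "}{" ++ x := by
  rw [← String.append_assoc]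
  rfl

theorem main_equiv (xs : List (String × Int)) (s : Int) (hs : PySem.Int.mod s 5 = 0) :
    (PySem.List.enumerate xs s).foldl aStep "" = PySem.Str.join "" (chunkPieces xs) := by
  have hd : (5 : Int) ∣ s := by
    simp [PySem.Int.mod, Int.fmod_eq_emod] at hs; omega
  have d1 : ¬ (5 : Int) ∣ s + 1 := by omega
  have d2 : ¬ (5 : Int) ∣ s + 1 + 1 := by omega
  have d3 : ¬ (5 : Int) ∣ s + 1 + 1 + 1 := by omega
  have d4 : ¬ (5 : Int) ∣ s + 1 + 1 + 1 + 1 := by omega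
  have d5 : (5 : Int) ∣ s + 1 + 1 + 1 + 1 + 1 := by omega
  match xs with
  | [] =>
    simp [PySem.List.enumerate_nil, chunkPieces, join_empty_nil]
  | [a] =>
    simp [PySem.List.enumerate_cons, PySem.List.enumerate_nil, aStep, d1,
      chunkPieces, join_empty_cons, join_empty_nil, fmtEntry,
      String.empty_append, String.append_empty, String.append_assoc, brace_merge]
  | [a, b] =>
    simp [PySem.List.enumerate_cons, PySem.List.enumerate_nil, aStep, d1, d2,
      chunkPieces, join_empty_cons, join_empty_nil, fmtEntry,
      String.empty_append, String.append_empty, String.append_assoc, brace_merge]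
  | [a, b, c] =>
    simp [PySem.List.enumerate_cons, PySem.List.enumerate_nil, aStep, d1, d2, d3,
      chunkPieces, join_empty_cons, join_empty_nil, fmtEntry,
      String.empty_append, String.append_empty, String.append_assoc, brace_merge]
  | [a, b, c, d] =>
    simp [PySem.List.enumerate_cons, PySem.List.enumerate_nil, aStep, d1, d2, d3, d4,
      chunkPieces, join_empty_cons, join_empty_nil, fmtEntry,
      String.empty_append, String.append_empty, String.append_assoc, brace_merge]
  | a :: b :: c :: d :: e :: rest =>
    have hs' : PySem.Int.mod (s + 1 + 1 + 1 + 1 + 1) 5 = 0 := by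
      simp [PySem.Int.mod, Int.fmod_eq_emod]; omega
    have htail := main_equiv rest (s + 1 + 1 + 1 + 1 + 1) hs'
    have hrhs : chunkPieces (a :: b :: c :: d :: e :: rest) =
        (PySem.Str.join "" ([a, b, c, d, e].map fmtEntry) ++ "<br>") :: chunkPieces rest := by
      rw [chunkPieces]
      simp
    rw [hrhs, join_empty_cons]
    simp only [PySem.List.enumerate_cons, List.foldl_cons]
    rw [foldl_aStep_acc, htail]
    simp [aStep, d1, d2, d3, d4, d5, join_empty_cons, join_empty_nil, fmtEntry,
      String.empty_append, String.append_empty, String.append_assoc, brace_merge]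
termination_by xs.length

-- ===== VERDICT (by name: the statement is the Claim_ definition above) =====
theorem balanceformat_spec : Claim_equal_balanceformat := by
  intro balance _
  unfold Spec_balanceformat balanceformat balanceformat_alt
  exact main_equiv balance 0 (by decide)
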